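-- pv_equiv track=rewrite | github.com/lunohod0002/AvitoBot | main.py | cleaned_phones
-- ===== SOURCE A (Python) =====
-- def cleaned_phones(phones):
--     cleaned_numbers = []
--     mas={}
--
--     for number in phones:
--         start_digit = number[0]
--         unique_part = number[1:]
--         mas[unique_part]=start_digit
--     for i in mas:
--         cleaned_numbers.append(mas[i]+i)
--     return cleaned_numbers
-- ===== SOURCE B (Python) =====
-- def cleaned_phones(phones):
--     last_digit = {}
--     for number in phones:
--         last_digit[number[1:]] = number[0]
--     result = []
--     seen = set()
--     for number in phones:
--         suffix = number[1:]
--         if suffix not in seen: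
--             seen.add(suffix)
--             result.append(last_digit[suffix] + suffix)
--     return result
-- ===== Notes on version B (the rewrite author's own statement) =====
-- stated objective: alternative
-- what changed: A fills one dict and then iterates the dict's keys to emit digit+suffix; B separates the two jobs: a first pass builds the last-digit dict, and a second membership-tested pass over the original phone list with a seen-set emits each suffix's entry at its first occurrence.
import Mathlib
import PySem

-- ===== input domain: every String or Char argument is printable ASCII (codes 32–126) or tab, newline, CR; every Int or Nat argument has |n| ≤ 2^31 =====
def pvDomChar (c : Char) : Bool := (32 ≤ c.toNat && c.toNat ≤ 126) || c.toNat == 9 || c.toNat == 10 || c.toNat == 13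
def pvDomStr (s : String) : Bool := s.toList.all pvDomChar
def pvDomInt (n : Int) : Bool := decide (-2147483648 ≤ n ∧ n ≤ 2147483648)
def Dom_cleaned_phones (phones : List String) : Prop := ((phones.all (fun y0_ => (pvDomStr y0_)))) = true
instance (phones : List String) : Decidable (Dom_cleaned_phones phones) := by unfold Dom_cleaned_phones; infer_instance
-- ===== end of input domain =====

-- B re-decomposes A: same last-digit dict, but the output is produced by a second
-- membership-tested pass over the original phones (a seen-set) instead of iterating
-- the dict's keys; equal output, same cost (objective: alternative decomposition).

-- ===== PORT A =====
def cleaned_phones (phones : List String) : List String :=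
  let mas : PySem.Dict String Char :=
    phones.foldl (fun d number =>
      d.insert (PySem.Str.slice number (some 1) none)          -- number[1:]
               ((PySem.Str.pyGet? number 0).getD '?'))         -- number[0]; none = IndexError on "", excluded by Pre_
      PySem.Dict.empty
  mas.keys.foldl (fun cleaned_numbers i =>
      cleaned_numbers ++ [String.ofList ((mas.getD i '?') :: i.toList)])   -- mas[i] + i
    []

-- ===== PORT B =====
def cleaned_phones_alt (phones : List String) : List String :=
  let last_digit : PySem.Dict String Char :=
    phones.foldl (fun d number =>
      d.insert (PySem.Str.slice number (some 1) none)
               ((PySem.Str.pyGet? number 0).getD '?'))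
      PySem.Dict.empty
  (phones.foldl (fun (st : PySem.Set String × List String) number =>
      if st.1.contains (PySem.Str.slice number (some 1) none) then st
      else (PySem.Set.add st.1 (PySem.Str.slice number (some 1) none),
            st.2 ++ [String.ofList ((last_digit.getD (PySem.Str.slice number (some 1) none) '?')
                       :: (PySem.Str.slice number (some 1) none).toList)]))
    (PySem.Set.empty, [])).2

-- ===== PRECONDITION & SPEC =====
-- Pre_ excludes lists containing an empty string, on which Python A raises IndexError (number[0]).
def Pre_cleaned_phones (phones : List String) : Prop := ∀ s ∈ phones, s ≠ ""
instance (phones : List String) : Decidable (Pre_cleaned_phones phones) := by unfold Pre_cleaned_phones; infer_instance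
def pvWitness_cleaned_phones : List String := ["79991234567", "89991234567", "71112223344"]

def Spec_cleaned_phones (phones : List String) (out : List String) : Prop := out = cleaned_phones_alt phones
instance (phones : List String) (out : List String) : Decidable (Spec_cleaned_phones phones out) := by unfold Spec_cleaned_phones; infer_instance

-- ===== CLAIM (what is proved, stated in full; the proofs are below) =====
def Claim_equal_cleaned_phones : Prop := ∀ (phones : List String), Dom_cleaned_phones phones → Pre_cleaned_phones phones → Spec_cleaned_phones phones (cleaned_phones phones)

-- ===== LEMMAS AND PROOFS =====

-- Membership in a set after add, as a Bool equation.
theorem pv_contains_add {α : Type} [BEq α] [LawfulBEq α] (seen : PySem.Set α) (x a : α) :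
    (PySem.Set.add seen x).contains a = (seen.contains a || a == x) := by
  simp only [PySem.Set.add, PySem.Set.contains]
  by_cases h : List.contains seen x
  · simp only [h, if_true]
    by_cases hax : a = x
    · subst hax; simp_all
    · simp [hax]
  · simp only [h, Bool.false_eq_true, if_false, List.contains_append]
    simp

-- Filtering by a predicate that is false at x ignores a discard of x.
theorem pv_filter_discard {α : Type} [BEq α] [LawfulBEq α] (S : PySem.Set α) (p : α → Bool) (x : α)
    (hx : p x = false) : (PySem.Set.discard S x).filter p = S.filter p := by
  unfold PySem.Set.discard
  rw [List.filter_filter]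
  apply List.filter_congr
  intro a _
  by_cases h : a = x
  · subst h; simp [hx]
  · simp [h]

-- Filtering out a freshly added seen-element equals discarding it first.
theorem pv_filter_add {α : Type} [BEq α] [LawfulBEq α] (S seen : PySem.Set α) (x : α) :
    S.filter (fun k => !(PySem.Set.add seen x).contains k)
      = (PySem.Set.discard S x).filter (fun k => !seen.contains k) := by
  unfold PySem.Set.discard
  rw [List.filter_filter]
  apply List.filter_congr
  intro a _
  rw [pv_contains_add]
  simp

-- B's second pass, characterised: it appends g at the first occurrence of each key
-- not yet seen, i.e. it maps g over the not-yet-seen part of the ordered dedup of the keys.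
theorem pv_loopB {α β γ : Type} [BEq α] [LawfulBEq α] (key : β → α) (g : α → γ) :
    ∀ (l : List β) (seen : PySem.Set α) (acc : List γ),
    (l.foldl (fun (st : PySem.Set α × List γ) x =>
        if st.1.contains (key x) then st
        else (PySem.Set.add st.1 (key x), st.2 ++ [g (key x)])) (seen, acc)).2
      = acc ++ ((PySem.Set.ofList (l.map key)).filter (fun k => !seen.contains k)).map g := by
  intro l
  induction l with
  | nil => intro seen acc; simp [PySem.Set.ofList_nil]
  | cons x t ih =>
    intro seen acc
    rw [List.foldl_cons]
    by_cases h : seen.contains (key x) = true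
    · simp only [h, if_true]
      rw [ih seen acc, List.map_cons, PySem.Set.ofList_cons, List.filter_cons]
      simp only [h, Bool.not_true, Bool.false_eq_true, if_false]
      rw [pv_filter_discard _ _ _ (by rw [h]; rfl)]
    · simp only [h, Bool.false_eq_true, if_false]
      rw [ih (PySem.Set.add seen (key x)) (acc ++ [g (key x)])]
      rw [List.map_cons, PySem.Set.ofList_cons, List.filter_cons]
      simp only [Bool.not_eq_true] at h
      simp only [h, Bool.not_false, if_true]
      rw [pv_filter_add]
      simp

-- ===== VERDICT (by name: the statement is the Claim_ definition above) =====
theorem cleaned_phones_spec : Claim_equal_cleaned_phones := by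
  intro phones _ _
  unfold Spec_cleaned_phones
  simp only [cleaned_phones, cleaned_phones_alt]
  rw [PySem.List.foldl_append_singleton_eq_map]
  rw [PySem.Dict.keys_foldl_insert_key phones (fun number => PySem.Str.slice number (some 1) none)
        (fun _ number => (PySem.Str.pyGet? number 0).getD '?') PySem.Dict.empty]
  rw [PySem.Dict.keys_empty, PySem.Set.update_nil_left]
  generalize (phones.foldl (fun d number =>
      PySem.Dict.insert d (PySem.Str.slice number (some 1) none)
        ((PySem.Str.pyGet? number 0).getD '?')) PySem.Dict.empty) = D
  rw [pv_loopB (fun number => PySem.Str.slice number (some 1) none)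
       (fun s => String.ofList ((D.getD s '?') :: s.toList)) phones PySem.Set.empty []]
  simp [PySem.Set.empty, PySem.Set.contains]
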